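-- pv_equiv track=rewrite | github.com/agnesedaniele/GridPythonModule | GridPythonModule/GridPyM.py | generate_torus_link
-- ===== SOURCE A (Python) =====
-- def generate_torus_link(P,Q):
--     r"""
--     Creates a grid representing the torus link T(P,Q). The two parameters need to be
--     non-zero integers, and the number of components of the link is gcd(P,Q).
--
--     OUTPUT:
--
--     A grid diagram for T(P,Q).
--
--     EXAMPLES::
--
--     >> G = generate_torus_link(5,15)
--     >> number_of_components(G)
--     5
--
--     """
--     if P == 0 or Q == 0:
--         raise Exception("Only non-zero coefficients")
--     AA = [r for r in range(abs(P)+abs(Q))]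
--     BB = [r for r in range(abs(P), abs(P)+abs(Q))] + [r for r in range(abs(P))]
--     if P*Q < 0:
--         return [AA,BB]
--     else:
--         return mirror_grid([AA,BB])
--
-- def mirror_grid(input_grid):
--     r"""
--     Provides a grid whose associated knot type is the mirror of the given one.
--
--     OUTPUT:
--
--     Returns the mirror of the grid.
--
--     EXAMPLES::
--
--     >> G = [[0,1,2,3,4],[2,3,4,0,1]]
--     >> mirror_grid(G)
--     [[4, 3, 2, 1, 0], [1, 0, 4, 3, 2]]
--
--     """
--     return(rotate(input_grid, 1))
--
-- def rotate(input_grid, number_rotations):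
--     r"""
--     Rotates the grid number_rotations times counter-clockwise. Note that rotating
--     by pi/2 returns a grid representing the mirror of the input.
--
--     OUTPUT:
--
--     Returns the rotated grid.
--
--     EXAMPLES::
--
--     >> G = [[0,1,2,3,4],[2,3,4,0,1]]
--     >> rotate(G,1)
--     [[4, 3, 2, 1, 0], [1, 0, 4, 3, 2]]
--
--
--     >> G = [[0,1,2,3,4],[2,3,4,0,1]]
--     >> rotate(G,4)
--     [[0,1,2,3,4],[2,3,4,0,1]]
--
--     """
--     A = input_grid[0]
--     B = input_grid[1]
--     for i in range(number_rotations):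
--         A = rotate_once(A)
--         B = rotate_once(B)
--     return([A, B])
--
-- def rotate_once(input_list):
--     r"""
--     Auxiliary function that rotates one set of markings once counter-clockwise.
--
--     OUTPUT:
--
--     Returns a list of the rotated markings.
--
--     EXAMPLES::
--
--     >> G = [0,1,2,3,4]
--     >> rotate_once(G)
--     [4, 3, 2, 1, 0]
--
--     """
--     return [len(input_list)-input_list.index(a)-1 for a in range(len(input_list))]
-- ===== SOURCE B (Python) =====
-- def generate_torus_link(P, Q):
--     if P == 0 or Q == 0:
--         raise Exception("Only non-zero coefficients")
--     p = abs(P)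
--     n = abs(P) + abs(Q)
--     if P * Q < 0:
--         return [list(range(n)), [(i + p) % n for i in range(n)]]
--     else:
--         return [[n - 1 - i for i in range(n)],
--                 [n - 1 - (a - p) % n for a in range(n)]]
-- ===== Notes on version B (the rewrite author's own statement) =====
-- stated objective: faster
-- what changed: B builds both rows of the grid directly by O(n) modular arithmetic instead of concatenating ranges and then rotating via mirror_grid/rotate/rotate_once, whose list.index call inside a comprehension makes A's positive branch O(n^2).
import Mathlib
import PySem

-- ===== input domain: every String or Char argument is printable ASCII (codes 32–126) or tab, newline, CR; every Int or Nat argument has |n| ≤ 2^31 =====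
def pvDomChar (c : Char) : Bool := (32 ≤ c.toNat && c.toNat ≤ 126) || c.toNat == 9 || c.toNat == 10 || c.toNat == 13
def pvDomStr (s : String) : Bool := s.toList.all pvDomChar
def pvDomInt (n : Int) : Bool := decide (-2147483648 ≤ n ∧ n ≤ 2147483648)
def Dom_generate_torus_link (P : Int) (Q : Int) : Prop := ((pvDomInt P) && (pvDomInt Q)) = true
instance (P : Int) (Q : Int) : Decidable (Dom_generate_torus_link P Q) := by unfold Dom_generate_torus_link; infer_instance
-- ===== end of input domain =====

-- B replaces A's O(n^2) index-based rotation by direct O(n) modular-arithmetic row construction.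
-- Both Pythons raise on P = 0 or Q = 0; Pre_ excludes exactly those inputs.

-- ===== PORT A =====
-- rotate_once: [len(l)-l.index(a)-1 for a in range(len(l))]; within A's use every a is found,
-- so the .getD 0 default (Python: ValueError) is never taken inside Pre_.
def pvRotateOnce (l : List Int) : List Int :=
  (PySem.List.pyRange 0 (l.length : Int) 1).map
    (fun a => (l.length : Int) - (((PySem.List.index? l a).getD 0 : Nat) : Int) - 1)

-- rotate: A = g[0], B = g[1]; in A's use the grid always has two rows, so the getD [] default
-- (Python: IndexError) is never taken.
def pvRotate (g : List (List Int)) (k : Int) : List (List Int) :=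
  let A := (PySem.List.pyGet? g 0).getD []
  let B := (PySem.List.pyGet? g 1).getD []
  let (A, B) := (PySem.List.pyRange 0 k 1).foldl
    (fun (st : List Int × List Int) _ => (pvRotateOnce st.1, pvRotateOnce st.2)) (A, B)
  [A, B]

def pvMirrorGrid (g : List (List Int)) : List (List Int) := pvRotate g 1

def generate_torus_link (P : Int) (Q : Int) : List (List Int) :=
  if P = 0 ∨ Q = 0 then []  -- Python raises here; excluded by Pre_
  else
    let AA := PySem.List.pyRange 0 (|P| + |Q|) 1
    let BB := PySem.List.pyRange |P| (|P| + |Q|) 1 ++ PySem.List.pyRange 0 |P| 1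
    if P * Q < 0 then [AA, BB] else pvMirrorGrid [AA, BB]

-- ===== PORT B =====
def generate_torus_link_alt (P : Int) (Q : Int) : List (List Int) :=
  if P = 0 ∨ Q = 0 then []  -- Python raises here; excluded by Pre_
  else
    let p := |P|
    let n := |P| + |Q|
    if P * Q < 0 then
      [PySem.List.pyRange 0 n 1,
       (PySem.List.pyRange 0 n 1).map (fun i => PySem.Int.mod (i + p) n)]
    else
      [(PySem.List.pyRange 0 n 1).map (fun i => n - 1 - i),
       (PySem.List.pyRange 0 n 1).map (fun a => n - 1 - PySem.Int.mod (a - p) n)]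

-- ===== PRECONDITION & SPEC =====
-- Both programs raise "Only non-zero coefficients" on P = 0 or Q = 0; Pre_ excludes exactly that.
def Pre_generate_torus_link (P : Int) (Q : Int) : Prop := P ≠ 0 ∧ Q ≠ 0
instance (P : Int) (Q : Int) : Decidable (Pre_generate_torus_link P Q) := by
  unfold Pre_generate_torus_link; infer_instance
def pvWitness_generate_torus_link : Int × Int := (2, 3)

def Spec_generate_torus_link (P : Int) (Q : Int) (out : List (List Int)) : Prop :=
  out = generate_torus_link_alt P Q
instance (P : Int) (Q : Int) (out : List (List Int)) : Decidable (Spec_generate_torus_link P Q out) := by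
  unfold Spec_generate_torus_link; infer_instance

-- ===== CLAIM (what is proved, stated in full; the proofs are below) =====
def Claim_equal_generate_torus_link : Prop := ∀ (P : Int) (Q : Int),
  Dom_generate_torus_link P Q → Pre_generate_torus_link P Q →
  Spec_generate_torus_link P Q (generate_torus_link P Q)

-- ===== LEMMAS AND PROOFS =====

-- list.index of v in range(a,b) is v-a
theorem index?_pyRange (a b v : Int) (h0 : a ≤ v) (h1 : v < b) :
    PySem.List.index? (PySem.List.pyRange a b 1) v = some (v - a).toNat := by
  rw [PySem.List.index?_eq_some_iff]
  refine ⟨PySem.List.pyRange a v 1, PySem.List.pyRange (v+1) b 1, ?_, ?_, ?_⟩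
  · rw [← PySem.List.pyRange_one_cons h1, ← PySem.List.pyRange_one_append a v b h0 (le_of_lt h1)]
  · simp [PySem.List.length_pyRange_one]
  · intro hv
    rw [PySem.List.mem_pyRange_one] at hv
    omega

-- list.index of v in range(p,n)+range(0,p)
theorem emod_small (x n : Int) (h0 : 0 ≤ x) (h1 : x < n) : x % n = x :=
  Int.emod_eq_of_lt h0 h1

theorem emod_neg_small (x n : Int) (h0 : -n ≤ x) (h1 : x < 0) : x % n = x + n := by
  rw [← Int.add_emod_right, Int.emod_eq_of_lt (by omega) (by omega)]

theorem emod_big (x n : Int) (h0 : n ≤ x) (h1 : x < 2*n) : x % n = x - n := by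
  rw [← Int.sub_emod_right, Int.emod_eq_of_lt (by omega) (by omega)]

theorem index?_shiftRange (p n v : Int) (hp0 : 0 < p) (hpn : p < n) (h0 : 0 ≤ v) (h1 : v < n) :
    PySem.List.index? (PySem.List.pyRange p n 1 ++ PySem.List.pyRange 0 p 1) v =
      some (PySem.Int.mod (v - p) n).toNat := by
  rw [PySem.Int.mod_eq_emod_of_pos (by omega : (0:Int) < n)]
  by_cases hv : p ≤ v
  · rw [PySem.List.index?_append_of_mem _ (by rw [PySem.List.mem_pyRange_one]; omega),
      index?_pyRange p n v hv h1, emod_small _ _ (by omega) (by omega)]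
  · rw [Int.not_le] at hv
    rw [emod_neg_small _ _ (by omega) (by omega), PySem.List.index?_eq_some_iff]
    refine ⟨PySem.List.pyRange p n 1 ++ PySem.List.pyRange 0 v 1,
      PySem.List.pyRange (v+1) p 1, ?_, ?_, ?_⟩
    · rw [List.append_assoc, ← PySem.List.pyRange_one_cons hv,
        ← PySem.List.pyRange_one_append 0 v p h0 (le_of_lt hv)]
    · simp [PySem.List.length_pyRange_one]
      omega
    · intro hmem
      rcases List.mem_append.mp hmem with h | h <;> rw [PySem.List.mem_pyRange_one] at h <;> omega

theorem length_shiftRange (p n : Int) (hp0 : 0 < p) (hpn : p < n) :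
    ((PySem.List.pyRange p n 1 ++ PySem.List.pyRange 0 p 1).length : Int) = n := by
  simp [PySem.List.length_pyRange_one]
  omega

-- A's BB equals B's closed-form second row (negative branch)
theorem row2_neg (p n : Int) (hp0 : 0 < p) (hpn : p < n) :
    PySem.List.pyRange p n 1 ++ PySem.List.pyRange 0 p 1 =
      (PySem.List.pyRange 0 n 1).map (fun i => PySem.Int.mod (i + p) n) := by
  rw [PySem.List.pyRange_one_append 0 (n - p) n (by omega) (by omega), List.map_append]
  congr 1
  · apply List.ext_getElem
    · simp [PySem.List.length_pyRange_one]
    · intro k hk hk'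
      rw [PySem.List.length_pyRange_one] at hk
      rw [PySem.List.getElem_pyRange_one, List.getElem_map, PySem.List.getElem_pyRange_one,
        PySem.Int.mod_eq_emod_of_pos (by omega : (0:Int) < n),
        emod_small _ _ (by omega) (by omega)]
      omega
  · apply List.ext_getElem
    · simp [PySem.List.length_pyRange_one]
    · intro k hk hk'
      rw [PySem.List.length_pyRange_one] at hk
      rw [PySem.List.getElem_pyRange_one, List.getElem_map, PySem.List.getElem_pyRange_one,
        PySem.Int.mod_eq_emod_of_pos (by omega : (0:Int) < n),
        emod_big _ _ (by omega) (by omega)]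
      omega

-- rotate_once on range(n) is the reversed range (positive branch, first row)
theorem rotateOnce_range (n : Int) (hn : 0 < n) :
    pvRotateOnce (PySem.List.pyRange 0 n 1) = (PySem.List.pyRange 0 n 1).map (fun i => n - 1 - i) := by
  unfold pvRotateOnce
  have hlen : ((PySem.List.pyRange 0 n 1).length : Int) = n := by
    simp [PySem.List.length_pyRange_one]; omega
  rw [hlen]
  apply List.map_congr_left
  intro a ha
  rw [PySem.List.mem_pyRange_one] at ha
  rw [index?_pyRange 0 n a ha.1 ha.2]
  simp only [Option.getD_some]
  omega

-- rotate_once on A's BB is B's closed-form second row (positive branch)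
theorem rotateOnce_shiftRange (p n : Int) (hp0 : 0 < p) (hpn : p < n) :
    pvRotateOnce (PySem.List.pyRange p n 1 ++ PySem.List.pyRange 0 p 1) =
      (PySem.List.pyRange 0 n 1).map (fun a => n - 1 - PySem.Int.mod (a - p) n) := by
  unfold pvRotateOnce
  rw [length_shiftRange p n hp0 hpn]
  apply List.map_congr_left
  intro a ha
  rw [PySem.List.mem_pyRange_one] at ha
  rw [index?_shiftRange p n a hp0 hpn ha.1 ha.2]
  simp only [Option.getD_some]
  rw [PySem.Int.mod_eq_emod_of_pos (by omega : (0:Int) < n)]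
  have hb1 := Int.emod_nonneg (a - p) (by omega : (n:Int) ≠ 0)
  have hb2 := Int.emod_lt_of_pos (a - p) (by omega : (0:Int) < n)
  omega

-- ===== VERDICT (by name: the statement is the Claim_ definition above) =====
theorem generate_torus_link_spec : Claim_equal_generate_torus_link := by
  intro P Q _ hpre
  obtain ⟨hP, hQ⟩ := hpre
  unfold Spec_generate_torus_link generate_torus_link generate_torus_link_alt
  have hne : ¬(P = 0 ∨ Q = 0) := by tauto
  simp only [if_neg hne]
  have hp0 : (0:Int) < |P| := abs_pos.mpr hP
  have hpn : |P| < |P| + |Q| := by have := abs_pos.mpr hQ; omega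
  have hn : (0:Int) < |P| + |Q| := by omega
  by_cases hs : P * Q < 0
  · simp only [if_pos hs]
    rw [row2_neg |P| (|P| + |Q|) hp0 hpn]
  · simp only [if_neg hs]
    unfold pvMirrorGrid pvRotate
    simp only [PySem.List.pyGet?, PySem.List.pyIdx?]
    norm_num
    rw [show PySem.List.pyRange 0 1 1 = [0] from by decide]
    simp only [List.foldl_cons, List.foldl_nil]
    rw [rotateOnce_range _ hn, rotateOnce_shiftRange |P| (|P| + |Q|) hp0 hpn]
    exact ⟨rfl, rfl⟩
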